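-- pv_equiv track=rewrite | github.com/NVlabs/CraftRTL | correct-by-construction/waveform/utils_fsm.py | generate_one_hot_sequences
-- ===== SOURCE A (Python) =====
-- def generate_one_hot_sequences(num_bits):
--     num_sequences = num_bits
--     one_hot_sequences = []
--     for i in range(num_sequences):
--         sequence = [0] * num_bits
--         sequence[i] = 1
--         sequence = ''.join([str(i) for i in sequence])
--         one_hot_sequences.append(sequence)
--     return one_hot_sequences[::-1]
-- ===== SOURCE B (Python) =====
-- def generate_one_hot_sequences(num_bits):
--     return [format(1 << j, f'0{num_bits}b') for j in range(num_bits)]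
-- ===== Notes on version B (the rewrite author's own statement) =====
-- stated objective: faster
-- what changed: Instead of building a zero list, mutating one index, stringifying every digit and joining, then reversing the whole list, B formats a single shifted bit as a zero-padded binary string for each position, avoiding the per-row list allocation, per-digit str() calls, join and final reversal.
import Mathlib
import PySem

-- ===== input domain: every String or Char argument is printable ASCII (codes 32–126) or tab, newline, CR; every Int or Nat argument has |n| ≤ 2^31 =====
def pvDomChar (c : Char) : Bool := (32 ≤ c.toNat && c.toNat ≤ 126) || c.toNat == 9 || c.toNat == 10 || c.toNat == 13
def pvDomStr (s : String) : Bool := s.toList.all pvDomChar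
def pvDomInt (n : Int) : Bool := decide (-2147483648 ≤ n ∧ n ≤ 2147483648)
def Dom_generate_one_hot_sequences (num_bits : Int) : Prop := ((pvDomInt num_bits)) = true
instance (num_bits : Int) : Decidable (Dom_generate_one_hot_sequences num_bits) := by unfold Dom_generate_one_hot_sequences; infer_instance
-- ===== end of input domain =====

-- B replaces A's list-mutation + join + final reversal by directly formatting 1 << j as a zero-padded binary string (idiomatic closed-form construction).


-- ===== PORT A =====
def generate_one_hot_sequences (num_bits : Int) : List String :=
  let num_sequences := num_bits
  let one_hot_sequences : List String := []
  let one_hot_sequences :=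
    (PySem.List.pyRange 0 num_sequences 1).foldl (fun one_hot_sequences i =>
      let sequence := PySem.List.pyRepeat [(0 : Int)] num_bits
      let sequence := PySem.List.pySetD sequence i 1
      let sequence := PySem.Str.join "" (sequence.map (fun x => PySem.Int.toStr x))
      one_hot_sequences ++ [sequence]) one_hot_sequences
  (PySem.List.slice? one_hot_sequences none none (-1)).getD []

-- ===== PORT B =====
-- binary digits of n, most significant first (hand port of the digit list behind format(n, 'b'); exact here since B only formats n ≥ 1)
def pvBinChars (n : Nat) : List Char :=
  if _h : n = 0 then [] else pvBinChars (n / 2) ++ [if n % 2 = 1 then '1' else '0']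
  termination_by n
  decreasing_by omega

-- format(m, f'0{width}b') for m ≥ 1: binary digits left-padded with '0' to the given width
def pvFormatBin (m : Nat) (width : Int) : String :=
  String.ofList (List.replicate (width.toNat - (pvBinChars m).length) '0' ++ pvBinChars m)

def generate_one_hot_sequences_alt (num_bits : Int) : List String :=
  (PySem.List.pyRange 0 num_bits 1).map (fun j => pvFormatBin (1 <<< j.toNat) num_bits)

-- ===== PRECONDITION & SPEC =====
def Spec_generate_one_hot_sequences (num_bits : Int) (out : List String) : Prop := out = generate_one_hot_sequences_alt num_bits
instance (num_bits : Int) (out : List String) : Decidable (Spec_generate_one_hot_sequences num_bits out) := by unfold Spec_generate_one_hot_sequences; infer_instance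

-- ===== CLAIM (what is proved, stated in full; the proofs are below) =====
def Claim_equal_generate_one_hot_sequences : Prop := ∀ (num_bits : Int), Dom_generate_one_hot_sequences num_bits → Spec_generate_one_hot_sequences num_bits (generate_one_hot_sequences num_bits)

-- ===== LEMMAS AND PROOFS =====

-- the append-accumulate loop is a map
theorem pv_foldl_append {α β : Type} (g : α → β) :
    ∀ (l : List α) (acc : List β), l.foldl (fun a i => a ++ [g i]) acc = acc ++ l.map g := by
  intro l
  induction l with
  | nil => simp
  | cons x xs ih => intro acc; simp [List.foldl_cons, ih]

theorem pv_set_replicate {α : Type} (a b : α) :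
    ∀ (k n : Nat), k < n →
      (List.replicate n a).set k b = List.replicate k a ++ b :: List.replicate (n - 1 - k) a := by
  intro k
  induction k with
  | zero =>
    intro n hn
    obtain ⟨m, rfl⟩ := Nat.exists_eq_succ_of_ne_zero (Nat.pos_iff_ne_zero.mp hn)
    simp [List.replicate_succ]
  | succ k ih =>
    intro n hn
    obtain ⟨m, rfl⟩ := Nat.exists_eq_succ_of_ne_zero (Nat.pos_iff_ne_zero.mp (Nat.lt_of_le_of_lt (Nat.zero_le _) hn))
    have hk : k < m := by omega
    simp [List.replicate_succ, List.set_cons_succ, ih m hk]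
    omega

-- joining singleton strings with "" is String.ofList of the characters
theorem pv_join_singles (cs : List Char) :
    PySem.Str.join "" (cs.map (fun c => String.ofList [c])) = String.ofList cs := by
  have h : (PySem.Str.join "" (cs.map (fun c => String.ofList [c]))).toList = cs := by
    rw [PySem.Str.toList_join]
    simp only [List.map_map]
    have heq : (String.toList ∘ fun c => String.ofList [c]) = fun c => [c] := by
      funext c; simp
    rw [heq]
    simp [PySem.Chars.join_nil_singletons cs]
  calc PySem.Str.join "" (cs.map (fun c => String.ofList [c]))
      = String.ofList (PySem.Str.join "" (cs.map (fun c => String.ofList [c]))).toList :=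
        String.ofList_toList.symm
    _ = String.ofList cs := by rw [h]

-- A's row k (for k < num_bits.toNat)
theorem pv_rowA (nb : Int) (k : Nat) (hk : k < nb.toNat) :
    PySem.Str.join "" ((PySem.List.pySetD (PySem.List.pyRepeat [(0 : Int)] nb) ((0 : Int) + k) 1).map
        (fun x => PySem.Int.toStr x)) =
      String.ofList (List.replicate k '0' ++ '1' :: List.replicate (nb.toNat - 1 - k) '0') := by
  rw [zero_add, PySem.List.pyRepeat_singleton, PySem.List.pySetD_natCast]
  rw [List.map_set, List.map_replicate]
  have h0 : PySem.Int.toStr 0 = "0" := rfl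
  have h1 : PySem.Int.toStr 1 = "1" := rfl
  rw [h0, h1, pv_set_replicate _ _ _ _ hk]
  have heq : List.replicate k "0" ++ "1" :: List.replicate (nb.toNat - 1 - k) "0" =
      (List.replicate k '0' ++ '1' :: List.replicate (nb.toNat - 1 - k) '0').map
        (fun c => String.ofList [c]) := by
    simp [List.map_replicate]
  rw [heq, pv_join_singles]

theorem pv_binChars_pow (j : Nat) : pvBinChars (2 ^ j) = '1' :: List.replicate j '0' := by
  induction j with
  | zero =>
    rw [pvBinChars]
    norm_num
    rw [pvBinChars]
    simp
  | succ j ih =>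
    rw [pvBinChars]
    have h2 : 2 ^ (j + 1) ≠ 0 := by positivity
    have hdiv : 2 ^ (j + 1) / 2 = 2 ^ j := by
      rw [pow_succ]; exact Nat.mul_div_cancel _ (by norm_num)
    have hmod : 2 ^ (j + 1) % 2 = 0 := by
      rw [pow_succ]; exact Nat.mul_mod_left _ _
    simp only [h2, hdiv, hmod, ih]
    simp [List.replicate_succ']

-- B's row j (for j < num_bits.toNat)
theorem pv_rowB (nb : Int) (j : Nat) (hj : j < nb.toNat) :
    pvFormatBin (1 <<< ((0 : Int) + j).toNat) nb =
      String.ofList (List.replicate (nb.toNat - 1 - j) '0' ++ '1' :: List.replicate j '0') := by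
  rw [zero_add, Int.toNat_natCast]
  unfold pvFormatBin
  rw [Nat.one_shiftLeft, pv_binChars_pow]
  have hlen : ('1' :: List.replicate j '0').length = j + 1 := by simp
  rw [hlen]
  have heq : nb.toNat - (j + 1) = nb.toNat - 1 - j := by omega
  rw [heq]

-- ===== VERDICT (by name: the statement is the Claim_ definition above) =====
theorem generate_one_hot_sequences_spec : Claim_equal_generate_one_hot_sequences := by
  intro n _
  unfold Spec_generate_one_hot_sequences
  simp only [generate_one_hot_sequences, generate_one_hot_sequences_alt]
  rw [pv_foldl_append, PySem.List.slice?_none_none_neg_one]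
  simp only [Option.getD_some, List.nil_append]
  rw [PySem.List.pyRange_one, List.map_map, List.map_map, sub_zero]
  apply List.ext_getElem
  · simp
  · intro k h1 h2
    simp only [List.length_reverse, List.length_map, List.length_range] at h1 h2
    rw [List.getElem_reverse]
    simp only [List.getElem_map, List.getElem_range, List.length_map, List.length_range, Function.comp]
    rw [pv_rowA n (n.toNat - 1 - k) (by omega), pv_rowB n k (by omega)]
    have heq : n.toNat - 1 - (n.toNat - 1 - k) = k := by omega
    rw [heq]
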